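-- pv_equiv track=rewrite | github.com/vizopsai/harden | harden/analyzer/external_services.py | _domain_covered
-- ===== SOURCE A (Python) =====
-- def _domain_covered(domain: str, found: dict) -> bool:
--     """Check if a domain is already covered by a known service's domains."""
--     for info in found.values():
--         for d in info.get("domains", []):
--             if d == domain:
--                 return True
--             # Wildcard match: *.amazonaws.com matches s3.amazonaws.com
--             if d.startswith("*.") and domain.endswith(d[1:]):
--                 return True
--     return False
-- ===== SOURCE B (Python) =====
-- def _domain_covered(domain: str, found: dict) -> bool:
--     """Check if a domain is already covered by a known service's domains."""
--     exact = set()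
--     wildcards = set()
--     for info in found.values():
--         for d in info.get("domains", []):
--             exact.add(d)
--             if d.startswith("*."):
--                 wildcards.add(d)
--     if domain in exact:
--         return True
--     for i, ch in enumerate(domain):
--         if ch == '.' and ('*' + domain[i:]) in wildcards:
--             return True
--     return False
-- ===== Notes on version B (the rewrite author's own statement) =====
-- stated objective: idiomatic
-- what changed: Instead of testing every known domain against the query with equality/endswith, B builds an exact-domain set and a wildcard set in one pass and then looks up the query and its '*'-prefixed dot-suffix candidates in those sets.
import Mathlib
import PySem

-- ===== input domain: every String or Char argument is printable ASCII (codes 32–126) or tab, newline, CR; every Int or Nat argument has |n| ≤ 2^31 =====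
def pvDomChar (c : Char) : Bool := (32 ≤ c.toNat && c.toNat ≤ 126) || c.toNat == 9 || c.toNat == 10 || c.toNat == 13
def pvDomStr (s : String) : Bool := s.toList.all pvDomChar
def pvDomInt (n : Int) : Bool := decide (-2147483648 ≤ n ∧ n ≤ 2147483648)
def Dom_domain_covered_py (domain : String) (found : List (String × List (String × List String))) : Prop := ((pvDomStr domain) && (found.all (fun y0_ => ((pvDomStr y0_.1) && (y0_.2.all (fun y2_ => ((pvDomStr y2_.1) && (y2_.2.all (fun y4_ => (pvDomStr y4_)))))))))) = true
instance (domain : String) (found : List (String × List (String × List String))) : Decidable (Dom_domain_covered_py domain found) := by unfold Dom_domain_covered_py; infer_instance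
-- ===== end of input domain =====

-- B replaces A's scan of every known domain (equality + endswith per entry) by two sets built
-- once — all domains, and the wildcard ones — looked up with the query and its '*'-prefixed
-- dot-suffix candidates; same result, a more idiomatic set-lookup formulation.

-- ===== PORT A =====
-- inner 'for d in info.get("domains", [])' loop with its two early returns
def pvA_domains (domain : String) : List String → Bool
  | [] => false
  | d :: ds =>
    if d == domain then true
    else if PySem.Str.startswith d "*." && PySem.Str.endswith domain (PySem.Str.slice d (some 1) none) then true
    else pvA_domains domain ds

-- outer 'for info in found.values()' loop
def pvA_infos (domain : String) : List (String × List (String × List String)) → Bool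
  | [] => false
  | (_, info) :: rest =>
    if pvA_domains domain (PySem.Dict.getD ⟨info⟩ "domains" []) then true
    else pvA_infos domain rest

def domain_covered_py (domain : String) (found : List (String × List (String × List String))) : Bool :=
  pvA_infos domain found

-- ===== PORT B =====
-- inner loop of the collection pass: exact.add(d); if d.startswith("*."): wildcards.add(d)
def pvB_inner : (PySem.Set String × PySem.Set String) → List String → (PySem.Set String × PySem.Set String)
  | acc, [] => acc
  | (ex, wc), d :: ds =>
    pvB_inner (PySem.Set.add ex d, if PySem.Str.startswith d "*." then PySem.Set.add wc d else wc) ds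

-- outer loop of the collection pass
def pvB_collect : (PySem.Set String × PySem.Set String) → List (String × List (String × List String)) → (PySem.Set String × PySem.Set String)
  | acc, [] => acc
  | acc, (_, info) :: rest => pvB_collect (pvB_inner acc (PySem.Dict.getD ⟨info⟩ "domains" [])) rest

-- 'for i, ch in enumerate(domain): if ch == "." and ("*" + domain[i:]) in wildcards: return True'
def pvB_scan (domain : String) (wc : PySem.Set String) : List (Int × Char) → Bool
  | [] => false
  | (i, ch) :: rest =>
    if ch == '.' && PySem.Set.contains wc ("*" ++ PySem.Str.slice domain (some i) none) then true
    else pvB_scan domain wc rest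

def domain_covered_py_alt (domain : String) (found : List (String × List (String × List String))) : Bool :=
  let acc := pvB_collect (PySem.Set.empty, PySem.Set.empty) found
  if PySem.Set.contains acc.1 domain then true
  else pvB_scan domain acc.2 (PySem.List.enumerate domain.toList 0)

-- ===== PRECONDITION & SPEC =====
def Spec_domain_covered_py (domain : String) (found : List (String × List (String × List String))) (out : Bool) : Prop := out = domain_covered_py_alt domain found
instance (domain : String) (found : List (String × List (String × List String))) (out : Bool) : Decidable (Spec_domain_covered_py domain found out) := by unfold Spec_domain_covered_py; infer_instance

-- ===== CLAIM (what is proved, stated in full; the proofs are below) =====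
def Claim_equal_domain_covered_py : Prop := ∀ (domain : String) (found : List (String × List (String × List String))), Dom_domain_covered_py domain found → Spec_domain_covered_py domain found (domain_covered_py domain found)

-- ===== LEMMAS AND PROOFS =====

-- all known domains, in iteration order
def pvAllD (found : List (String × List (String × List String))) : List String :=
  found.flatMap (fun kv => PySem.Dict.getD ⟨kv.2⟩ "domains" [])

def pvWild (d : String) : Bool := PySem.Str.startswith d "*."

def pvPredA (domain d : String) : Bool :=
  (d == domain) || (pvWild d && PySem.Str.endswith domain (PySem.Str.slice d (some 1) none))

theorem pvA_domains_any (domain : String) (ds : List String) :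
    pvA_domains domain ds = ds.any (pvPredA domain) := by
  induction ds with
  | nil => rfl
  | cons d ds ih =>
    rw [pvA_domains, List.any_cons, ih]
    unfold pvPredA pvWild
    split_ifs with h1 h2 <;> simp_all

theorem pvA_any (domain : String) (found : List (String × List (String × List String))) :
    domain_covered_py domain found = (pvAllD found).any (pvPredA domain) := by
  unfold domain_covered_py
  induction found with
  | nil => rfl
  | cons kv rest ih =>
    obtain ⟨k, info⟩ := kv
    rw [pvA_infos, pvA_domains_any]
    simp only [pvAllD, List.flatMap_cons, List.any_append] at *
    split_ifs with h <;> simp [h, ih]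

theorem pvB_inner_spec (ex wc : PySem.Set String) (ds : List String) :
    pvB_inner (ex, wc) ds = (PySem.Set.update ex ds, PySem.Set.update wc (ds.filter pvWild)) := by
  induction ds generalizing ex wc with
  | nil => simp [pvB_inner, PySem.Set.update_nil]
  | cons d ds ih =>
    rw [pvB_inner, ih, List.filter_cons]
    unfold pvWild
    split_ifs with h <;> simp [PySem.Set.update_cons]

theorem pvB_collect_spec (ex wc : PySem.Set String) (found : List (String × List (String × List String))) :
    pvB_collect (ex, wc) found =
      (PySem.Set.update ex (pvAllD found), PySem.Set.update wc ((pvAllD found).filter pvWild)) := by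
  induction found generalizing ex wc with
  | nil => simp [pvB_collect, pvAllD, PySem.Set.update_nil]
  | cons kv rest ih =>
    rw [pvB_collect, pvB_inner_spec, ih]
    simp only [pvAllD, List.flatMap_cons, List.filter_append, PySem.Set.update_append]

theorem pvB_scan_any (domain : String) (wc : PySem.Set String) (l : List (Int × Char)) :
    pvB_scan domain wc l =
      l.any (fun q => q.2 == '.' && PySem.Set.contains wc ("*" ++ PySem.Str.slice domain (some q.1) none)) := by
  induction l with
  | nil => rfl
  | cons q rest ih =>
    obtain ⟨i, ch⟩ := q
    rw [pvB_scan, List.any_cons]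
    split_ifs with h <;> simp_all

theorem pv_contains_iff (s : PySem.Set String) (x : String) :
    PySem.Set.contains s x = true ↔ x ∈ s := by
  simp [PySem.Set.contains]

theorem pv_update_empty (xs : List String) :
    PySem.Set.update (PySem.Set.empty : PySem.Set String) xs = PySem.Set.ofList xs := by
  simp [PySem.Set.update, PySem.Set.ofList_eq_foldl, PySem.Set.empty]

theorem pv_cand_toList (domain : String) (k : Nat) :
    ("*" ++ PySem.Str.slice domain (some (k : Int)) none).toList = '*' :: domain.toList.drop k := by
  simp [PySem.List.slice_from_natCast]

-- the heart of the equivalence: A's per-domain test succeeds on some known domain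
-- iff the query is a known domain or some '*'-prefixed dot-suffix candidate is a known wildcard
theorem pv_central (domain : String) (L : List String) :
    (∃ d ∈ L, pvPredA domain d = true) ↔
      (domain ∈ L ∨ ∃ k : Nat, k < domain.toList.length ∧
        domain.toList[k]? = some '.' ∧ ("*" ++ PySem.Str.slice domain (some (k : Int)) none) ∈ L.filter pvWild) := by
  constructor
  · rintro ⟨d, hdL, hpred⟩
    simp only [pvPredA, Bool.or_eq_true, Bool.and_eq_true, beq_iff_eq] at hpred
    rcases hpred with h | ⟨hw, he⟩
    · exact Or.inl (h ▸ hdL)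
    · right
      have hpre : ['*', '.'] <+: d.toList := by
        have := (PySem.Chars.startswith_iff d.toList "*.".toList).mp (by simpa [pvWild] using hw)
        simpa using this
      obtain ⟨t, ht⟩ := hpre
      have hd1 : d.toList.drop 1 = '.' :: t := by rw [← ht]; rfl
      have hslice : (PySem.Str.slice d (some 1) none).toList = d.toList.drop 1 := by
        simp [PySem.List.slice_from_one, List.drop_one]
      have hsuf : d.toList.drop 1 <:+ domain.toList := by
        have := (PySem.Chars.endswith_iff domain.toList (PySem.Str.slice d (some 1) none).toList).mp
          (by simpa using he)
        simpa [hslice] using this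
      obtain ⟨pre, hpreq⟩ := hsuf
      have hdl : domain.toList.drop pre.length = '.' :: t := by
        rw [← hpreq, hd1, List.drop_left]
      have hlen : pre.length < domain.toList.length := by
        rw [← hpreq, hd1]; simp
      refine ⟨pre.length, hlen, ?_, ?_⟩
      · have h0 : (domain.toList.drop pre.length)[0]? = some '.' := by rw [hdl]; rfl
        rwa [List.getElem?_drop, Nat.add_zero] at h0
      · have hcand : ("*" ++ PySem.Str.slice domain (some (pre.length : Int)) none) = d := by
          apply String.toList_inj.mp
          rw [pv_cand_toList, hdl, ← ht]
          rfl
        rw [hcand]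
        exact List.mem_filter.mpr ⟨hdL, by simpa [pvWild] using hw⟩
  · rintro (h | ⟨k, hk, _, hmem⟩)
    · exact ⟨domain, h, by simp [pvPredA]⟩
    · set c := "*" ++ PySem.Str.slice domain (some (k : Int)) none with hc
      have hcL := List.mem_filter.mp hmem
      refine ⟨c, hcL.1, ?_⟩
      have hw : pvWild c = true := hcL.2
      have hct : c.toList = '*' :: domain.toList.drop k := pv_cand_toList domain k
      have hcs : (PySem.Str.slice c (some 1) none).toList = domain.toList.drop k := by
        simp [PySem.List.slice_from_one, hct]
      have hend : PySem.Str.endswith domain (PySem.Str.slice c (some 1) none) = true := by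
        have : (PySem.Str.slice c (some 1) none).toList <:+ domain.toList := by
          rw [hcs]; exact List.drop_suffix k domain.toList
        simpa using (PySem.Chars.endswith_iff domain.toList _).mpr this
      rw [pvPredA, hw, hend]
      simp

theorem pv_main (domain : String) (found : List (String × List (String × List String))) :
    domain_covered_py domain found = domain_covered_py_alt domain found := by
  rw [pvA_any]
  unfold domain_covered_py_alt
  rw [show ((PySem.Set.empty, PySem.Set.empty) : PySem.Set String × PySem.Set String) =
      ((PySem.Set.empty : PySem.Set String), (PySem.Set.empty : PySem.Set String)) from rfl,
    pvB_collect_spec]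
  simp only [pv_update_empty, pvB_scan_any]
  cases hc : PySem.Set.contains (PySem.Set.ofList (pvAllD found)) domain with
  | true =>
    simp only [if_pos]
    rw [List.any_eq_true]
    have hmem : domain ∈ pvAllD found := by
      have := (pv_contains_iff _ _).mp hc
      rwa [PySem.Set.mem_ofList] at this
    simpa using (pv_central domain (pvAllD found)).mpr (Or.inl hmem)
  | false =>
    simp only [Bool.false_eq_true, if_false]
    rw [Bool.eq_iff_iff, List.any_eq_true, List.any_eq_true]
    have hnot : domain ∉ pvAllD found := by
      intro hmem
      have hmem' : PySem.Set.contains (PySem.Set.ofList (pvAllD found)) domain = true := by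
        rw [pv_contains_iff, PySem.Set.mem_ofList]; exact hmem
      rw [hc] at hmem'; exact absurd hmem' (by simp)
    constructor
    · intro h
      rcases (pv_central domain (pvAllD found)).mp h with h' | ⟨k, hk, hdot, hmem⟩
      · exact absurd h' hnot
      · refine ⟨((k : Int), '.'), ?_, ?_⟩
        · rw [PySem.List.mem_enumerate_iff]
          refine ⟨k, hk, ?_⟩
          have : domain.toList[k] = '.' := by
            have := hdot; rwa [List.getElem?_eq_getElem hk, Option.some_inj] at this
          simp [this]
        · simp only [beq_self_eq_true, Bool.true_and]
          rw [pv_contains_iff, PySem.Set.mem_ofList]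
          exact hmem
    · rintro ⟨⟨i, ch⟩, hqmem, hq⟩
      rw [PySem.List.mem_enumerate_iff] at hqmem
      obtain ⟨k, hk, hkq⟩ := hqmem
      simp only [Prod.mk.injEq] at hkq
      obtain ⟨hi, hch⟩ := hkq
      simp only [Bool.and_eq_true, beq_iff_eq] at hq
      obtain ⟨hdot, hcont⟩ := hq
      apply (pv_central domain (pvAllD found)).mpr
      refine Or.inr ⟨k, hk, ?_, ?_⟩
      · rw [List.getElem?_eq_getElem hk, ← hch, hdot]
      · rw [pv_contains_iff, PySem.Set.mem_ofList] at hcont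
        rw [show ((k : Nat) : Int) = i from by omega]
        exact hcont

-- ===== VERDICT (by name: the statement is the Claim_ definition above) =====
theorem domain_covered_py_spec : Claim_equal_domain_covered_py := by
  intro domain found _
  unfold Spec_domain_covered_py
  exact pv_main domain found
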